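-- pv_equiv track=rewrite | github.com/rnscks/TurningMillingGenerator | utils/tree_io.py | classify_trees_by_groove_count
-- ===== SOURCE A (Python) =====
-- from typing import List, Dict, Optional, Tuple
--
-- def classify_trees_by_groove_count(trees: List[Dict]) -> Dict[int, List[int]]:
--     """
--     트리를 groove(g) 노드 개수별로 분류.
--
--     Args:
--         trees: 트리 딕셔너리 리스트
--
--     Returns:
--         {groove_count: [tree_indices]} 형태의 딕셔너리
--     """
--     result = {}
--     for i, tree in enumerate(trees):
--         g_count = sum(1 for n in tree.get('nodes', []) if n.get('label') == 'g')
--         if g_count not in result: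
--             result[g_count] = []
--         result[g_count].append(i)
--     return result
-- ===== SOURCE B (Python) =====
-- def classify_trees_by_groove_count(trees):
--     """Precompute each tree's groove count once, then build the result as a
--     dict comprehension over the distinct counts (first-appearance order),
--     collecting indices by a per-count scan of the counts list."""
--     counts = [[n.get('label') for n in t.get('nodes', [])].count('g') for t in trees]
--     order = list(dict.fromkeys(counts))
--     return {c: [i for i, x in enumerate(counts) if x == c] for c in order}
-- ===== Notes on version B (the rewrite author's own statement) =====
-- stated objective: alternative
-- what changed: Replaces A's single pass that mutates a dict of accumulating index lists with a counts-list precomputation, an ordered key dedup, and a dict comprehension that collects each count's indices by a separate scan.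
import Mathlib
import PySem

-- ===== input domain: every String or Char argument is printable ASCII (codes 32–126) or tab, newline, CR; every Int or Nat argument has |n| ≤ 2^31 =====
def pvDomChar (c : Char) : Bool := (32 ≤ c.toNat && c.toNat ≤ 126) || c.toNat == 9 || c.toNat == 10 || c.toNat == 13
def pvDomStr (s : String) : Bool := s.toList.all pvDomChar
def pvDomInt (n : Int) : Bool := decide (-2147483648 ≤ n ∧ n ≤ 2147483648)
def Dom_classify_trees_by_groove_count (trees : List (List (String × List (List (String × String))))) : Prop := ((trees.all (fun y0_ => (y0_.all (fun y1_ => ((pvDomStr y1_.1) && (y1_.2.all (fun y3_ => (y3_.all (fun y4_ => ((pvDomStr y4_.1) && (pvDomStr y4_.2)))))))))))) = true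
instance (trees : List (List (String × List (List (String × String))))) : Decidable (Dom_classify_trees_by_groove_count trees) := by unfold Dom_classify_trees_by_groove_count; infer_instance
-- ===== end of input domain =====

-- B replaces A's dict-mutating pass with a counts-list precomputation, an ordered dedup of the
-- distinct counts, and a per-count index-collecting comprehension; same result, similar cost.


-- ===== PORT A =====
-- g_count = sum(1 for n in tree.get('nodes', []) if n.get('label') == 'g')
def pvGCountA (tree : List (String × List (List (String × String)))) : Int :=
  ((PySem.Dict.mk tree).getD "nodes" []).foldl
    (fun acc n => if (PySem.Dict.mk n).get? "label" == some "g" then acc + 1 else acc) 0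

def classify_trees_by_groove_count (trees : List (List (String × List (List (String × String))))) : List (Int × List Int) :=
  ((PySem.List.enumerate trees 0).foldl
    (fun (result : PySem.Dict Int (List Int)) p =>
      let c := pvGCountA p.2
      let result := if result.contains c = false then result.insert c [] else result
      result.modify c [] (fun l => l ++ [p.1]))
    PySem.Dict.empty).items

-- ===== PORT B =====
-- [n.get('label') for n in t.get('nodes', [])].count('g')
def pvGCountB (tree : List (String × List (List (String × String)))) : Int :=
  ((((PySem.Dict.mk tree).getD "nodes" []).map
      (fun n => (PySem.Dict.mk n).get? "label")).count (some "g") : Nat)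

def classify_trees_by_groove_count_alt (trees : List (List (String × List (List (String × String))))) : List (Int × List Int) :=
  let counts := trees.map pvGCountB
  (PySem.List.dedup counts).map
    (fun c => (c, ((PySem.List.enumerate counts 0).filter (fun p => p.2 == c)).map (·.1)))

-- ===== PRECONDITION & SPEC =====
def Spec_classify_trees_by_groove_count (trees : List (List (String × List (List (String × String))))) (out : List (Int × List Int)) : Prop := out = classify_trees_by_groove_count_alt trees
instance (trees : List (List (String × List (List (String × String))))) (out : List (Int × List Int)) : Decidable (Spec_classify_trees_by_groove_count trees out) := by unfold Spec_classify_trees_by_groove_count; infer_instance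

-- ===== CLAIM (what is proved, stated in full; the proofs are below) =====
def Claim_equal_classify_trees_by_groove_count : Prop := ∀ (trees : List (List (String × List (List (String × String))))), Dom_classify_trees_by_groove_count trees → Spec_classify_trees_by_groove_count trees (classify_trees_by_groove_count trees)

-- ===== LEMMAS AND PROOFS =====

-- both ports count the same groove nodes
theorem pvGCount_eq : pvGCountA = pvGCountB := by
  funext t
  unfold pvGCountA pvGCountB
  rw [PySem.List.foldl_if_add_one]
  simp [List.count, List.countP_map, Function.comp_def]

-- inserting before modifying: overwriting a freshly appended empty entry is one insert
theorem pv_insert_insert {κ ν : Type} [BEq κ] [LawfulBEq κ] (d : PySem.Dict κ ν) (c : κ) (w v : ν)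
    (hfalse : d.contains c = false) : (d.insert c w).insert c v = d.insert c v := by
  simp only [PySem.Dict.contains] at hfalse
  have hnone : ∀ p ∈ d.items, (p.1 == c) = false := fun p hp => by
    have := List.any_eq_false.mp hfalse p hp; simpa using this
  have hid : ∀ u : ν, List.map (fun p => if (p.1 == c) = true then (c, u) else p) d.items = d.items := by
    intro u
    conv_rhs => rw [← List.map_id d.items]
    exact List.map_congr_left fun p hp => by simp [hnone p hp]
  simp only [PySem.Dict.insert, PySem.Dict.contains, hfalse, Bool.false_eq_true, if_false]
  have hins : ((d.items ++ [(c, w)]).any fun p => p.1 == c) = true := by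
    simp [List.any_append]
  simp only [hins, if_true, List.map_append, hid]
  simp

-- A's loop body is exactly 'modify with default []'
theorem pv_step_eq {d : PySem.Dict Int (List Int)} {c : Int} {f : List Int → List Int} :
    (if d.contains c = false then d.insert c [] else d).modify c [] f = d.modify c [] f := by
  by_cases h : d.contains c = true
  · simp [h]
  · have hfalse : d.contains c = false := eq_false_of_ne_true h
    rw [if_pos hfalse]
    simp only [PySem.Dict.modify, PySem.Dict.getD_insert_self,
      PySem.Dict.getD_of_not_contains d _ hfalse]
    exact pv_insert_insert d c [] (f []) hfalse

-- enumerate over a mapped list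
theorem pv_enumerate_map {α β : Type} (f : α → β) (xs : List α) (s : Int) :
    PySem.List.enumerate (xs.map f) s
      = (PySem.List.enumerate xs s).map (fun p => (p.1, f p.2)) := by
  induction xs generalizing s with
  | nil => simp [PySem.List.enumerate_nil]
  | cons x t ih => simp [PySem.List.enumerate_cons, ih]

-- ===== VERDICT (by name: the statement is the Claim_ definition above) =====
theorem classify_trees_by_groove_count_spec : Claim_equal_classify_trees_by_groove_count := by
  intro trees _
  unfold Spec_classify_trees_by_groove_count classify_trees_by_groove_count
    classify_trees_by_groove_count_alt
  rw [← pvGCount_eq]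
  set e := PySem.List.enumerate trees 0 with he
  set l := e.map (fun p => (pvGCountA p.2, p.1)) with hl
  -- A's fold is the pure modify-fold over l
  have hstep : e.foldl
      (fun (result : PySem.Dict Int (List Int)) p =>
        let c := pvGCountA p.2
        let result := if result.contains c = false then result.insert c [] else result
        result.modify c [] (fun lst => lst ++ [p.1]))
      PySem.Dict.empty
    = l.foldl (fun d q => d.modify q.1 [] (fun lst => lst ++ [q.2])) PySem.Dict.empty := by
    rw [hl, List.foldl_map]
    exact PySem.List.foldl_congr_mem e _ _ PySem.Dict.empty (fun d p _ => pv_step_eq)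
  rw [hstep]
  set D := l.foldl (fun d q => d.modify q.1 [] (fun lst => lst ++ [q.2])) PySem.Dict.empty with hD
  have hnodup : D.keys.Nodup := by
    rw [hD]
    exact PySem.Dict.nodup_keys_foldl_modify_key l Prod.fst []
      (fun _ q => fun lst => lst ++ [q.2]) PySem.Dict.empty (by simp [PySem.Dict.keys_empty])
  have hcounts : l.map Prod.fst = trees.map pvGCountA := by
    rw [hl, List.map_map]
    conv_rhs => rw [← PySem.List.map_snd_enumerate trees 0]
    rw [List.map_map]
    rfl
  have hkeys : D.keys = PySem.List.dedup (trees.map pvGCountA) := by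
    rw [hD, PySem.Dict.keys_foldl_modify_key l Prod.fst []
      (fun _ q => fun lst => lst ++ [q.2]) PySem.Dict.empty]
    rw [hcounts]
    simp [PySem.Dict.keys_empty, PySem.Set.update, PySem.List.dedup_eq_ofList, PySem.Set.ofList]
  rw [PySem.Dict.items_eq_map_keys D hnodup [], hkeys]
  apply List.map_congr_left
  intro c _
  have hgetD : D.getD c [] = (l.filter (fun p => p.1 == c)).map (fun p => p.2) := by
    rw [hD, PySem.Dict.getD_foldl_modify_append l PySem.Dict.empty c]
    simp [PySem.Dict.getD_empty]
  rw [hgetD]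
  rw [pv_enumerate_map pvGCountA trees 0, ← he]
  rw [hl, List.filter_map, List.filter_map, List.map_map, List.map_map]
  rfl
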